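-- pv_equiv track=rewrite | github.com/Kacperon/informatik | WDI/zestaw2/zad7.py | czywiel
-- ===== SOURCE A (Python) =====
-- def czywiel(n):
--     i=0
--     an=1
--     while an<=n:
--         an=i*i+i+1
--         while an<=n:
--             if an==n:
--                 return True
--             an+=an
--         an=1
--         i+=1
--     return(False)
-- ===== SOURCE B (Python) =====
-- def czywiel(n):
--     if n < 1:
--         return False
--     i = 0
--     while True:
--         base = i * i + i + 1
--         if n % base == 0:
--             q = n // base
--             if q & (q - 1) == 0:
--                 return True
--         i += 1
-- ===== Notes on version B (the rewrite author's own statement) =====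
-- stated objective: simpler
-- what changed: Replaces A's inner doubling loop (regenerating successive doublings of base and comparing each against n) with a direct per-i arithmetic test: base divides n and the quotient is a power of two, checked with the standard bit trick; non-positive n is handled by an early return instead of A's loop-condition reset.
import Mathlib
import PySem

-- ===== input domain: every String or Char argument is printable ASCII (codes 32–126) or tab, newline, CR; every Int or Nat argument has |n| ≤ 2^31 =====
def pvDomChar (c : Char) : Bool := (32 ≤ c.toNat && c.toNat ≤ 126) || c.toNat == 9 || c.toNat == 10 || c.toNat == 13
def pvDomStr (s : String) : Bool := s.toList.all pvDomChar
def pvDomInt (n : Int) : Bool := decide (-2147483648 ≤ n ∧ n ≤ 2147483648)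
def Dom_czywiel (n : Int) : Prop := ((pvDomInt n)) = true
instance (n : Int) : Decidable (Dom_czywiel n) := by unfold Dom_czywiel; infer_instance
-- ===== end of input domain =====

-- B replaces A's inner doubling loop by a per-i divisibility + power-of-two test (simpler, one loop).
-- A's while-loops are ported with fuel n.toNat+2; fuel exhaustion (returning false) is only reachable
-- on inputs where the Python loops forever, and those are outside Pre_czywiel.

-- ===== PORT A =====
-- inner 'while an<=n: if an==n: return True; an+=an' — true = 'return True', false = loop exited
def czyInnerA (fuel : Nat) (n an : Int) : Bool :=
  match fuel with
  | 0 => false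
  | f + 1 =>
    if an ≤ n then
      if an = n then true else czyInnerA f n (an + an)
    else false

-- outer loop: after the reset 'an=1' the condition 'an<=n' is '1 ≤ n'
def czyOuterA (fuel : Nat) (n i : Int) : Bool :=
  match fuel with
  | 0 => false
  | f + 1 =>
    if 1 ≤ n then
      if czyInnerA (n.toNat + 2) n (i * i + i + 1) then true
      else czyOuterA f n (i + 1)
    else false

def czywiel (n : Int) : Bool := czyOuterA (n.toNat + 2) n 0

-- ===== PORT B =====
def czyLoopB (fuel : Nat) (n i : Int) : Bool :=
  match fuel with
  | 0 => false
  | f + 1 =>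
    let base := i * i + i + 1
    if PySem.Int.mod n base = 0 then
      let q := PySem.Int.floordiv n base
      if Int.land q (q - 1) = 0 then true else czyLoopB f n (i + 1)
    else czyLoopB f n (i + 1)

def czywiel_alt (n : Int) : Bool :=
  if n < 1 then false else czyLoopB (n.toNat + 2) n 0

-- ===== PRECONDITION & SPEC =====
-- the odd part of a positive integer (divide out all factors of 2); used only to state Pre_
def pvOddPartAux : Nat → Nat → Nat
  | 0, m => m
  | f + 1, m => if m % 2 = 0 ∧ m ≠ 0 then pvOddPartAux f (m / 2) else m
def pvOddPart (m : Nat) : Nat := pvOddPartAux m m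

-- floor integer square root by binary search (structural fuel; kernel-reducible, early exit)
def pvSqrtBS : Nat → Nat → Nat → Nat → Nat
  | 0, lo, _, _ => lo
  | f + 1, lo, hi, m =>
    if hi ≤ lo + 1 then lo
    else
      let mid := (lo + hi) / 2
      if mid * mid ≤ m then pvSqrtBS f mid hi m else pvSqrtBS f lo mid m
def pvSqrt (m : Nat) : Nat := pvSqrtBS (m + 2) 0 (m + 1) m

-- Pre_ excludes exactly the n ≥ 1 not of the form (i²+i+1)·2^k (equivalently: whose odd part is not
-- i²+i+1 for any i, i.e. 4·oddPart(n)−3 is not a perfect square): on those the Python A (and B) loops forever.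
def Pre_czywiel (n : Int) : Prop :=
  n < 1 ∨ pvSqrt (4 * pvOddPart n.toNat - 3) * pvSqrt (4 * pvOddPart n.toNat - 3)
            = 4 * pvOddPart n.toNat - 3
instance (n : Int) : Decidable (Pre_czywiel n) := by unfold Pre_czywiel; infer_instance
def pvWitness_czywiel : Int := (12)
def Spec_czywiel (n : Int) (out : Bool) : Prop := out = czywiel_alt n
instance (n : Int) (out : Bool) : Decidable (Spec_czywiel n out) := by unfold Spec_czywiel; infer_instance

-- ===== CLAIM (what is proved, stated in full; the proofs are below) =====
def Claim_equal_czywiel : Prop := ∀ (n : Int), Dom_czywiel n → Pre_czywiel n → Spec_czywiel n (czywiel n)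

-- ===== LEMMAS AND PROOFS =====

-- the inner doubling loop of A finds n = an * 2^k when it has fuel > k
theorem czyInnerA_true (k : Nat) : ∀ (fuel : Nat) (n an : Int), 1 ≤ an →
    n = an * 2 ^ k → k < fuel → czyInnerA fuel n an = true := by
  induction k with
  | zero =>
    intro fuel n an h1 hn hf
    match fuel with
    | f + 1 =>
      simp only [pow_zero, mul_one] at hn
      simp [czyInnerA, hn]
  | succ k ih =>
    intro fuel n an h1 hn hf
    match fuel with
    | f + 1 =>
      have h2 : an < n := by
        have : an * 2 ≤ an * 2 ^ (k + 1) := by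
          apply mul_le_mul_of_nonneg_left _ (by omega)
          exact le_self_pow₀ (by norm_num) (by omega)
        omega
      have hn' : n = (an + an) * 2 ^ k := by rw [hn]; ring
      simp only [czyInnerA]
      rw [if_pos (le_of_lt h2), if_neg (by omega)]
      exact ih f n (an + an) (by omega) hn' (by omega)

-- A's outer loop returns true as soon as some base i+d makes the inner loop return true
theorem czyOuterA_true : ∀ (fuel d : Nat) (n i : Int), 1 ≤ n → d < fuel →
    czyInnerA (n.toNat + 2) n ((i + d) * (i + d) + (i + d) + 1) = true →
    czyOuterA fuel n i = true := by
  intro fuel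
  induction fuel with
  | zero => intro d n i _ hd; omega
  | succ f ih =>
    intro d n i hn hd hin
    simp only [czyOuterA, if_pos hn]
    match d with
    | 0 =>
      simp only [Nat.cast_zero, add_zero] at hin
      rw [if_pos hin]
    | d + 1 =>
      by_cases h : czyInnerA (n.toNat + 2) n (i * i + i + 1) = true
      · rw [if_pos h]
      · rw [if_neg h]
        apply ih d n (i + 1) hn (by omega)
        have : i + 1 + (d : Int) = i + ((d : Nat) + 1 : Nat) := by push_cast; ring
        rw [this]
        exact hin

-- B's loop returns true as soon as the test fires at some i+d
theorem czyLoopB_true : ∀ (fuel d : Nat) (n i : Int), d < fuel →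
    PySem.Int.mod n ((i + d) * (i + d) + (i + d) + 1) = 0 →
    Int.land (PySem.Int.floordiv n ((i + d) * (i + d) + (i + d) + 1))
      (PySem.Int.floordiv n ((i + d) * (i + d) + (i + d) + 1) - 1) = 0 →
    czyLoopB fuel n i = true := by
  intro fuel
  induction fuel with
  | zero => intro d n i hd; omega
  | succ f ih =>
    intro d n i hd hmod hland
    simp only [czyLoopB]
    match d with
    | 0 =>
      simp only [Nat.cast_zero, add_zero] at hmod hland
      rw [if_pos hmod, if_pos hland]
    | d + 1 =>
      have hshift : i + 1 + (d : Int) = i + ((d : Nat) + 1 : Nat) := by push_cast; ring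
      by_cases h1 : PySem.Int.mod n (i * i + i + 1) = 0
      · rw [if_pos h1]
        by_cases h2 : Int.land (PySem.Int.floordiv n (i * i + i + 1))
            (PySem.Int.floordiv n (i * i + i + 1) - 1) = 0
        · rw [if_pos h2]
        · rw [if_neg h2]
          apply ih d n (i + 1) (by omega) <;> rw [hshift]
          · exact hmod
          · exact hland
      · rw [if_neg h1]
        apply ih d n (i + 1) (by omega) <;> rw [hshift]
        · exact hmod
        · exact hland

theorem nat_two_pow_land (k : Nat) : 2 ^ k &&& (2 ^ k - 1) = 0 := by
  apply Nat.zero_of_testBit_eq_false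
  intro j
  rw [Nat.testBit_land]
  by_cases hj : j = k
  · subst hj
    rw [Nat.testBit_eq_false_of_lt (n := 2 ^ j - 1) (by have : 1 ≤ 2 ^ j := Nat.one_le_two_pow; omega)]
    simp
  · rw [Nat.testBit_two_pow_of_ne (Ne.symm hj)]
    simp

theorem int_two_pow_land (k : Nat) : Int.land ((2 : Int) ^ k) ((2 : Int) ^ k - 1) = 0 := by
  have h1 : ((2 : Int) ^ k) = ((2 ^ k : Nat) : Int) := by push_cast; ring
  have h2 : ((2 ^ k : Nat) : Int) - 1 = ((2 ^ k - 1 : Nat) : Int) := by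
    have h : 1 ≤ 2 ^ k := Nat.one_le_two_pow; push_cast [h]; ring
  rw [h1, h2]
  show Int.land (Int.ofNat _) (Int.ofNat _) = 0
  simp only [Int.land]
  rw [nat_two_pow_land]
  rfl

theorem pvOddPartAux_decomp : ∀ (f m : Nat), 0 < m → m ≤ f →
    ∃ k, m = pvOddPartAux f m * 2 ^ k ∧ 0 < pvOddPartAux f m := by
  intro f
  induction f with
  | zero => intro m hm hf; omega
  | succ f ih =>
    intro m hm hf
    by_cases h : m % 2 = 0 ∧ m ≠ 0
    · obtain ⟨k, hk, hp⟩ := ih (m / 2) (by omega) (by omega)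
      refine ⟨k + 1, ?_, ?_⟩
      · show m = (if m % 2 = 0 ∧ m ≠ 0 then pvOddPartAux f (m / 2) else m) * 2 ^ (k + 1)
        rw [if_pos h, pow_succ]
        have h2 : m = (m / 2) * 2 := by omega
        calc m = (m / 2) * 2 := h2
          _ = pvOddPartAux f (m / 2) * 2 ^ k * 2 := by rw [← hk]
          _ = pvOddPartAux f (m / 2) * (2 ^ k * 2) := by ring
      · show 0 < (if m % 2 = 0 ∧ m ≠ 0 then pvOddPartAux f (m / 2) else m)
        rw [if_pos h]; exact hp
    · refine ⟨0, ?_, ?_⟩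
      · show m = (if m % 2 = 0 ∧ m ≠ 0 then pvOddPartAux f (m / 2) else m) * 2 ^ 0
        rw [if_neg h]; ring
      · show 0 < (if m % 2 = 0 ∧ m ≠ 0 then pvOddPartAux f (m / 2) else m)
        rw [if_neg h]; omega

theorem pvOddPart_decomp (m : Nat) (hm : 0 < m) :
    ∃ k, m = pvOddPart m * 2 ^ k ∧ 0 < pvOddPart m :=
  pvOddPartAux_decomp m m hm le_rfl

theorem sq_cond_gives_i (m : Nat) (hm : 0 < m)
    (hsq : pvSqrt (4 * m - 3) * pvSqrt (4 * m - 3) = 4 * m - 3) :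
    ∃ i, m = i * i + i + 1 := by
  set s := pvSqrt (4 * m - 3) with hs
  rcases Nat.even_or_odd s with ⟨t, ht⟩ | ⟨i, hi⟩
  · exfalso
    have h4 : s * s = 4 * (t * t) := by rw [ht]; ring
    omega
  · refine ⟨i, ?_⟩
    have h4 : s * s = 4 * (i * i) + 4 * i + 1 := by rw [hi]; ring
    omega

-- ===== VERDICT (by name: the statement is the Claim_ definition above) =====
theorem czywiel_spec : Claim_equal_czywiel := by
  intro n _ hpre
  unfold Spec_czywiel
  by_cases hneg : n < 1
  · -- n < 1: both return false
    unfold czywiel czywiel_alt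
    rw [if_pos hneg]
    have : n.toNat + 2 = 0 + 2 := by omega
    rw [this]
    simp [czyOuterA, show ¬ (1 ≤ n) by omega]
  · have hn1 : (1 : Int) ≤ n := by omega
    have hsq : pvSqrt (4 * pvOddPart n.toNat - 3) * pvSqrt (4 * pvOddPart n.toNat - 3)
        = 4 * pvOddPart n.toNat - 3 := hpre.resolve_left hneg
    obtain ⟨k, hdec, hpos⟩ := pvOddPart_decomp n.toNat (by omega)
    obtain ⟨i, hm⟩ := sq_cond_gives_i (pvOddPart n.toNat) hpos hsq
    have hrep : n = ((i * i + i + 1 : Nat) : Int) * 2 ^ k := by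
      have hn : n = (n.toNat : Int) := by omega
      rw [hn, hdec, hm]
      push_cast
      ring
    have hkn : 2 ^ k ≤ n.toNat := by
      calc 2 ^ k = 1 * 2 ^ k := by ring
        _ ≤ pvOddPart n.toNat * 2 ^ k := Nat.mul_le_mul_right _ hpos
        _ = n.toNat := hdec.symm
    have hk : k < n.toNat + 2 := by have := Nat.lt_two_pow_self (n := k); omega
    have hi : i < n.toNat + 2 := by
      have h1 : i * i + i + 1 ≤ pvOddPart n.toNat * 2 ^ k := by
        rw [← hm]
        calc pvOddPart n.toNat = pvOddPart n.toNat * 1 := by ring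
          _ ≤ pvOddPart n.toNat * 2 ^ k := Nat.mul_le_mul_left _ (Nat.one_le_two_pow)
      rw [← hdec] at h1
      omega
    have hbase1 : (1 : Int) ≤ ((i * i + i + 1 : Nat) : Int) := by
      have h0 : (0 : Int) ≤ (i : Int) := Int.natCast_nonneg i; push_cast; nlinarith
    have hinner : czyInnerA (n.toNat + 2) n ((i : Int) * i + i + 1) = true := by
      apply czyInnerA_true k (n.toNat + 2) n _ (by push_cast at hbase1 ⊢; omega)
      · rw [hrep]; push_cast; ring
      · exact hk
    have hA : czywiel n = true := by
      unfold czywiel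
      apply czyOuterA_true (n.toNat + 2) i n 0 hn1 (by omega)
      have hz : (0 : Int) + (i : Int) = (i : Int) := by ring
      rw [hz]
      exact hinner
    have hq : PySem.Int.floordiv n ((i : Int) * i + i + 1) = 2 ^ k := by
      rw [PySem.Int.floordiv_eq_ediv_of_pos (by push_cast at hbase1 ⊢; omega)]
      rw [hrep]
      have hcast : ((i * i + i + 1 : Nat) : Int) = (i : Int) * i + i + 1 := by push_cast; ring
      rw [hcast]
      exact Int.mul_ediv_cancel_left _ (by omega)
    have hmod : PySem.Int.mod n ((i : Int) * i + i + 1) = 0 := by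
      rw [PySem.Int.mod_eq_emod_of_pos (by push_cast at hbase1 ⊢; omega)]
      rw [hrep]
      have hcast : ((i * i + i + 1 : Nat) : Int) = (i : Int) * i + i + 1 := by push_cast; ring
      rw [hcast]
      exact Int.mul_emod_right _ _
    have hB : czywiel_alt n = true := by
      unfold czywiel_alt
      rw [if_neg (by omega)]
      apply czyLoopB_true (n.toNat + 2) i n 0 (by omega)
      · have hz : (0 : Int) + (i : Int) = (i : Int) := by ring
        rw [hz]; exact hmod
      · have hz : (0 : Int) + (i : Int) = (i : Int) := by ring
        rw [hz, hq]
        exact int_two_pow_land k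
    rw [hA, hB]
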